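-- pv_equiv track=rewrite | github.com/vlnn/zt | src/zt/inspect.py | _words_by_address
-- ===== SOURCE A (Python) =====
-- def _words_by_address(words: dict[str, dict]) -> dict[int, str]:
--     result: dict[int, str] = {}
--     for name, info in words.items():
--         addr = info["address"]
--         current = result.get(addr)
--         if current is None or _prefer(name, current):
--             result[addr] = name
--     return result
--
-- def _prefer(candidate: str, current: str) -> bool:
--     if len(candidate) != len(current):
--         return len(candidate) < len(current)
--     return candidate < current
-- ===== SOURCE B (Python) =====
-- def _words_by_address(words: dict[str, dict]) -> dict[int, str]:
--     groups: dict[int, list[str]] = {}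
--     for name, info in words.items():
--         groups.setdefault(info["address"], []).append(name)
--     return {addr: min(names, key=lambda n: (len(n), n)) for addr, names in groups.items()}
-- ===== Notes on version B (the rewrite author's own statement) =====
-- stated objective: simpler
-- what changed: Replaces the single-pass running-best dict update (get + _prefer comparison + conditional overwrite) by a two-phase group-then-reduce: first group names by address with setdefault/append, then take min(names, key=(len, name)) per group, inlining _prefer as a sort key.
import Mathlib
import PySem

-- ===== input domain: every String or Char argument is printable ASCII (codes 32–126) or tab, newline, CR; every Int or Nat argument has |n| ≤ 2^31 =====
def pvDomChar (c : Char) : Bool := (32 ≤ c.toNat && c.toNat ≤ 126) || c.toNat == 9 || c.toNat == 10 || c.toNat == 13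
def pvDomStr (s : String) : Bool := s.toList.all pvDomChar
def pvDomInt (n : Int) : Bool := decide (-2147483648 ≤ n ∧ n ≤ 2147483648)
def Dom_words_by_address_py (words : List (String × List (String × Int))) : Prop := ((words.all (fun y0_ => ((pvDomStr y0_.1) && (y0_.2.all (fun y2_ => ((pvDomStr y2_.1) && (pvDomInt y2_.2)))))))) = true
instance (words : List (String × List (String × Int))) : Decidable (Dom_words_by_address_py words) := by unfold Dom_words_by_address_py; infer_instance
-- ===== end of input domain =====

-- B replaces A's single-pass running-best update by a group-by-address then
-- per-group minimum with key (length, name); same result, simpler decomposition.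


-- shared transliteration of `info["address"]`; total via a default, used only under Pre_ (key present)
def pvAddr (info : List (String × Int)) : Int := (PySem.Dict.mk info).getD "address" 0

-- ===== PORT A =====
def pvPrefer (candidate current : String) : Bool :=
  if PySem.Str.len candidate ≠ PySem.Str.len current then
    decide (PySem.Str.len candidate < PySem.Str.len current)
  else decide (candidate < current)

def words_by_address_py (words : List (String × List (String × Int))) : List (Int × String) :=
  (words.foldl
    (fun (result : PySem.Dict Int String) np =>
      let addr := pvAddr np.2
      match result.get? addr with
      | none => result.insert addr np.1
      | some current => if pvPrefer np.1 current then result.insert addr np.1 else result)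
    PySem.Dict.empty).items

-- ===== PORT B =====
def words_by_address_py_alt (words : List (String × List (String × Int))) : List (Int × String) :=
  let groups : PySem.Dict Int (List String) :=
    words.foldl (fun g np => g.modify (pvAddr np.2) [] (· ++ [np.1])) PySem.Dict.empty
  groups.items.map (fun q => (q.1, (PySem.List.min2? q.2 PySem.Str.len (fun n => n)).getD ""))

-- ===== PRECONDITION & SPEC =====
-- Pre_ excludes exactly the inputs where some entry's info dict lacks the key "address": there Python A raises KeyError.
def Pre_words_by_address_py (words : List (String × List (String × Int))) : Prop :=
  ∀ p ∈ words, (PySem.Dict.mk p.2).contains "address" = true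
instance (words : List (String × List (String × Int))) : Decidable (Pre_words_by_address_py words) := by unfold Pre_words_by_address_py; infer_instance

def pvWitness_words_by_address_py : (List (String × List (String × Int))) :=
  [("double", [("address", 3)]), ("du", [("address", 3)]), ("q", [("address", 7)])]

def Spec_words_by_address_py (words : List (String × List (String × Int))) (out : List (Int × String)) : Prop := out = words_by_address_py_alt words
instance (words : List (String × List (String × Int))) (out : List (Int × String)) : Decidable (Spec_words_by_address_py words out) := by unfold Spec_words_by_address_py; infer_instance

-- ===== CLAIM (what is proved, stated in full; the proofs are below) =====
def Claim_equal_words_by_address_py : Prop := ∀ (words : List (String × List (String × Int))), Dom_words_by_address_py words → Pre_words_by_address_py words → Spec_words_by_address_py words (words_by_address_py words)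

-- ===== LEMMAS AND PROOFS =====

-- A's loop body, named for the proofs
def pvStepA (result : PySem.Dict Int String) (np : String × List (String × Int)) : PySem.Dict Int String :=
  let addr := pvAddr np.2
  match result.get? addr with
  | none => result.insert addr np.1
  | some current => if pvPrefer np.1 current then result.insert addr np.1 else result

-- the per-name reduction A performs on the names sharing one address
def pvPick (acc : Option String) (n : String) : Option String :=
  match acc with
  | none => some n
  | some c => some (if pvPrefer n c then n else c)

-- one A-step, observed at the address it touches
theorem pvStepA_get_self (d : PySem.Dict Int String) (p : String × List (String × Int)) :
    (pvStepA d p).get? (pvAddr p.2) = pvPick (d.get? (pvAddr p.2)) p.1 := by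
  simp only [pvStepA]
  cases hg : d.get? (pvAddr p.2) with
  | none => simp [PySem.Dict.get?_insert_self, pvPick]
  | some c =>
    by_cases hp : pvPrefer p.1 c <;>
      simp [hg, hp, pvPick, PySem.Dict.get?_insert_self]

-- one A-step, observed at any other address
theorem pvStepA_get_ne (d : PySem.Dict Int String) (p : String × List (String × Int))
    (a : Int) (h : pvAddr p.2 ≠ a) : (pvStepA d p).get? a = d.get? a := by
  simp only [pvStepA]
  cases hg : d.get? (pvAddr p.2) with
  | none => exact PySem.Dict.get?_insert_of_ne _ _ (Ne.symm h)
  | some c =>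
    by_cases hp : pvPrefer p.1 c
    · simp only [hp, if_pos trivial]
      exact PySem.Dict.get?_insert_of_ne _ _ (Ne.symm h)
    · simp [hp]

-- A's fold, observed through get? at one address, is pvPick folded over that address's names
theorem pvA_get? (l : List (String × List (String × Int))) (d : PySem.Dict Int String) (a : Int) :
    (l.foldl pvStepA d).get? a
      = ((l.filter (fun p => pvAddr p.2 == a)).map (·.1)).foldl pvPick (d.get? a) := by
  induction l generalizing d with
  | nil => simp
  | cons p l ih =>
    rw [List.foldl_cons, ih]
    by_cases h : pvAddr p.2 = a
    · subst h
      simp only [List.filter_cons, beq_self_eq_true, if_pos trivial, List.map_cons, List.foldl_cons]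
      rw [pvStepA_get_self]
    · have hb : (pvAddr p.2 == a) = false := by simp [h]
      simp only [List.filter_cons, hb, Bool.false_eq_true, if_false]
      rw [pvStepA_get_ne _ _ _ h]

-- one A-step appends the address to the key list iff it is new
theorem pvStepA_keys (d : PySem.Dict Int String) (p : String × List (String × Int)) :
    (pvStepA d p).keys = PySem.Set.add d.keys (pvAddr p.2) := by
  simp only [pvStepA, PySem.Set.add, PySem.Set.contains]
  cases hg : d.get? (pvAddr p.2) with
  | none =>
    have hc : d.contains (pvAddr p.2) = false := by
      rw [PySem.Dict.contains_eq_isSome_get?, hg]; rfl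
    have hm : pvAddr p.2 ∉ d.keys := fun hmem =>
      absurd ((PySem.Dict.contains_iff_mem_keys d _).mpr hmem) (by simp [hc])
    rw [PySem.Dict.keys_insert_of_not_contains _ _ hc]
    simp [hm]
  | some c =>
    have hc : d.contains (pvAddr p.2) = true := by
      rw [PySem.Dict.contains_eq_isSome_get?, hg]; rfl
    have hm : pvAddr p.2 ∈ d.keys := (PySem.Dict.contains_iff_mem_keys d _).mp hc
    by_cases hp : pvPrefer p.1 c
    · simp [hp, PySem.Dict.keys_insert_of_contains _ _ hc, hm]
    · simp [hp, hm]

-- A's fold keeps keys in first-encounter order of addresses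
theorem pvA_keys (l : List (String × List (String × Int))) (d : PySem.Dict Int String) :
    (l.foldl pvStepA d).keys = PySem.Set.update d.keys (l.map (fun p => pvAddr p.2)) := by
  induction l generalizing d with
  | nil => simp [PySem.Set.update]
  | cons p l ih =>
    rw [List.foldl_cons, ih, List.map_cons, pvStepA_keys]
    rfl

-- _prefer(n, c) is exactly "key (len n, n) is smaller than key (len c, c)" in min2?'s comparison
theorem pvPrefer_eq (n c : String) :
    pvPrefer n c
      = (decide (PySem.Str.len n < PySem.Str.len c)
         || !decide (PySem.Str.len c < PySem.Str.len n) && decide (n < c)) := by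
  unfold pvPrefer
  rcases Nat.lt_trichotomy n.length c.length with h | h | h
  · have h1 : n.length ≠ c.length := by omega
    simp [PySem.Str.len_eq, h, h1]
  · simp [PySem.Str.len_eq, h]
  · have h1 : n.length ≠ c.length := by omega
    have h2 : ¬ n.length < c.length := by omega
    simp [PySem.Str.len_eq, h, h1, h2]

-- min(names, key=(len, name)) is the same reduction A performs name by name
theorem pvMin2_eq_pick (ns : List String) :
    PySem.List.min2? ns PySem.Str.len (fun n => n) = ns.foldl pvPick none := by
  unfold PySem.List.min2?
  congr 1
  funext acc n
  cases acc with
  | none => rfl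
  | some c =>
    simp only [pvPick, pvPrefer_eq]
    split <;> rfl

-- B's grouping dict holds, at each address, exactly that address's names in order
theorem pvB_getD (l : List (String × List (String × Int))) (a : Int) :
    (l.foldl (fun (g : PySem.Dict Int (List String)) np =>
        g.modify (pvAddr np.2) [] (· ++ [np.1])) PySem.Dict.empty).getD a []
      = (l.filter (fun p => pvAddr p.2 == a)).map (·.1) := by
  have h := PySem.Dict.getD_foldl_modify_append
    (l.map (fun p => (pvAddr p.2, p.1))) (PySem.Dict.empty : PySem.Dict Int (List String)) a
  rw [List.foldl_map] at h
  simpa [List.filter_map, Function.comp_def, List.map_map] using h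

theorem words_by_address_py_spec : Claim_equal_words_by_address_py := by
  unfold Claim_equal_words_by_address_py
  intro words _ _
  unfold Spec_words_by_address_py
  show (words.foldl pvStepA PySem.Dict.empty).items
      = ((words.foldl (fun (g : PySem.Dict Int (List String)) np =>
            g.modify (pvAddr np.2) [] (· ++ [np.1])) PySem.Dict.empty).items).map
          (fun q => (q.1, (PySem.List.min2? q.2 PySem.Str.len (fun n => n)).getD ""))
  set dA := words.foldl pvStepA PySem.Dict.empty with hdA
  set dB := words.foldl (fun (g : PySem.Dict Int (List String)) np =>
      g.modify (pvAddr np.2) [] (· ++ [np.1])) PySem.Dict.empty with hdB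
  have hkB : dB.keys = PySem.Set.update [] (words.map (fun p => pvAddr p.2)) := by
    rw [hdB, PySem.Dict.keys_foldl_modify_key words (fun p => pvAddr p.2) []
      (fun _ np => (· ++ [np.1])), PySem.Dict.keys_empty]
  have hkA : dA.keys = PySem.Set.update [] (words.map (fun p => pvAddr p.2)) := by
    rw [hdA, pvA_keys, PySem.Dict.keys_empty]
  have hndB : dB.keys.Nodup := by
    rw [hdB]
    exact PySem.Dict.nodup_keys_foldl_modify_key words (fun p => pvAddr p.2) []
      (fun _ np => (· ++ [np.1])) PySem.Dict.empty (by simp)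
  have hndA : dA.keys.Nodup := by rw [hkA, ← hkB]; exact hndB
  rw [PySem.Dict.items_eq_map_keys dA hndA "", PySem.Dict.items_eq_map_keys dB hndB [],
    List.map_map, hkA, ← hkB]
  apply List.map_congr_left
  intro a _
  simp only [Function.comp_def]
  congr 1
  rw [PySem.Dict.getD_eq_get?_getD, hdA, pvA_get?, PySem.Dict.get?_empty, hdB, pvB_getD,
    pvMin2_eq_pick]
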